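-- pv_equiv track=rewrite | github.com/MauriceWa/pythonProject | Week 6/6.1 Challenges/main_date_decider.py | build_availability_dictionary
-- ===== SOURCE A (Python) =====
-- def build_availability_dictionary(csv_object: object) -> object:
--     '''this method will return the dictionary where the key is the day of the week and the value is the list of people
--     available that day'''
--     availability_dictionary = {}
--     for row_number,row in enumerate(csv_object):
--         for column_number,column in enumerate(row):
--             if row_number == 0:
--                 if column_number > 0:
--                     availability_dictionary[column] = []
--             else:
--                 if column == '1':
--                     if column_number == 1:
--                         availability_dictionary[csv_object[0][1]].append(row[0])
--                     if column_number == 2: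
--                         availability_dictionary[csv_object[0][2]].append(row[0])
--                     if column_number == 3:
--                         availability_dictionary[csv_object[0][3]].append(row[0])
--                     if column_number == 4:
--                         availability_dictionary[csv_object[0][4]].append(row[0])
--                     if column_number == 5:
--                         availability_dictionary[csv_object[0][5]].append(row[0])
--                     if column_number == 6:
--                         availability_dictionary[csv_object[0][6]].append(row[0])
--                     if column_number == 7:
--                         availability_dictionary[csv_object[0][7]].append(row[0])
--     return availability_dictionary
-- ===== SOURCE B (Python) =====
-- def build_availability_dictionary(csv_object: object) -> object:
--     '''Column-major rebuild: create the key for every header column > 0, then for each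
--     day-column 1..7 collect (in row order) the names of rows marked '1' in that column.'''
--     if not csv_object:
--         return {}
--     header = csv_object[0]
--     result = {day: [] for day in header[1:]}
--     rows = csv_object[1:]
--     for c in range(1, min(len(header), 8)):
--         result[header[c]] = [row[0] for row in rows if c < len(row) and row[c] == '1']
--     return result
-- ===== Notes on version B (the rewrite author's own statement) =====
-- stated objective: simpler
-- what changed: A walks the grid row-major, testing each cell's column number against seven sequential if-branches and appending into the dict cell by cell; B builds the key dict from header[1:] once and then fills it column-major, assigning each day-column 1..7 its complete member list with a single comprehension over the data rows.
import Mathlib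
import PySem

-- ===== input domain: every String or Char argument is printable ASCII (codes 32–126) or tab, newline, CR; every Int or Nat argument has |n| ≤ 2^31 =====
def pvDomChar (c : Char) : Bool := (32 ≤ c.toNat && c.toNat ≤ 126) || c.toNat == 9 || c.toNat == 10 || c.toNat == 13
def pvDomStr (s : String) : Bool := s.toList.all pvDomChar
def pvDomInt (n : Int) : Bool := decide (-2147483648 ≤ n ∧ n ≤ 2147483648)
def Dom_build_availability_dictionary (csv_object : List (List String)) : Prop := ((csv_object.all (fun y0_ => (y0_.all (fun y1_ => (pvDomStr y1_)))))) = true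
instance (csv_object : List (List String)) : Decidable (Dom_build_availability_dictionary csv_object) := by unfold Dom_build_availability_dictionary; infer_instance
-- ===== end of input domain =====

-- B rebuilds the dictionary column-major (one day-column at a time) instead of A's
-- row-major cell-by-cell appends; objective: simpler. Return-value equivalence only
-- (neither program mutates its argument).

-- ===== PORT A =====
-- availability_dictionary[csv_object[0][i]].append(row[0]); under Pre_ the key exists,
-- so Dict.modify (which would append a missing key) coincides with Python's d[k].append.
def pvAppendA (csv : List (List String)) (row : List String) (i : Int)
    (d : PySem.Dict String (List String)) : PySem.Dict String (List String) :=
  d.modify (PySem.List.pyGetD (PySem.List.pyGetD csv 0 []) i "") []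
    (fun v => v ++ [PySem.List.pyGetD row 0 ""])

-- the body of A's inner loop for a data row (row_number ≠ 0): the seven sequential ifs
def pvCellA (csv : List (List String)) (row : List String)
    (d : PySem.Dict String (List String)) (cc : Int × String) : PySem.Dict String (List String) :=
  if cc.2 == "1" then
    let d1 := if cc.1 == 1 then pvAppendA csv row 1 d else d
    let d2 := if cc.1 == 2 then pvAppendA csv row 2 d1 else d1
    let d3 := if cc.1 == 3 then pvAppendA csv row 3 d2 else d2
    let d4 := if cc.1 == 4 then pvAppendA csv row 4 d3 else d3
    let d5 := if cc.1 == 5 then pvAppendA csv row 5 d4 else d4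
    let d6 := if cc.1 == 6 then pvAppendA csv row 6 d5 else d5
    if cc.1 == 7 then pvAppendA csv row 7 d6 else d6
  else d

def build_availability_dictionary (csv_object : List (List String)) : List (String × List String) :=
  ((PySem.List.enumerate csv_object 0).foldl (fun d rr =>
      (PySem.List.enumerate rr.2 0).foldl (fun d cc =>
        if rr.1 == 0 then (if cc.1 > 0 then d.insert cc.2 ([] : List String) else d)
        else pvCellA csv_object rr.2 d cc) d)
    PySem.Dict.empty).items

-- ===== PORT B =====
-- [row[0] for row in rows if c < len(row) and row[c] == '1']
def pvCollectB (rows : List (List String)) (c : Int) : List String :=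
  rows.filterMap (fun row =>
    if decide (c < (row.length : Int)) && (PySem.List.pyGetD row c "" == "1")
    then some (PySem.List.pyGetD row 0 "") else none)

def build_availability_dictionary_alt (csv_object : List (List String)) : List (String × List String) :=
  match csv_object with
  | [] => []
  | header :: rows =>
    let d0 := (PySem.List.slice header (some 1) none).foldl
        (fun d day => d.insert day ([] : List String)) PySem.Dict.empty
    ((PySem.List.pyRange 1 (min (header.length : Int) 8) 1).foldl
        (fun d c => d.insert (PySem.List.pyGetD header c "") (pvCollectB rows c)) d0).items

-- ===== PRECONDITION & SPEC =====
-- Pre_ excludes (a) grids where some data row has '1' in a column 1..7 at or beyond the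
-- header's length — there A raises IndexError — and (b) grids whose header repeats a day
-- name among columns 1..7, on which A returns but the interleaving of the appends from the
-- two equal-named columns is an accident of A's row-major traversal (a defensible corner
-- either way; B keeps only the last such column's list).
def Pre_build_availability_dictionary (csv_object : List (List String)) : Prop :=
  (((csv_object.headD []).drop 1).take 7).Nodup ∧
  ∀ r ∈ csv_object.tail, ∀ c : Nat, c < 8 → 1 ≤ c → c < r.length →
    r.getD c "" = "1" → c < (csv_object.headD []).length
instance (csv_object : List (List String)) : Decidable (Pre_build_availability_dictionary csv_object) := by
  unfold Pre_build_availability_dictionary; infer_instance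

def pvWitness_build_availability_dictionary : List (List String) :=
  [["name", "mon", "tue"], ["alice", "1", "0"], ["bob", "0", "1"]]

def Spec_build_availability_dictionary (csv_object : List (List String)) (out : List (String × List String)) : Prop := out = build_availability_dictionary_alt csv_object
instance (csv_object : List (List String)) (out : List (String × List String)) : Decidable (Spec_build_availability_dictionary csv_object out) := by unfold Spec_build_availability_dictionary; infer_instance

-- ===== CLAIM (what is proved, stated in full; the proofs are below) =====
def Claim_equal_build_availability_dictionary : Prop := ∀ (csv_object : List (List String)), Dom_build_availability_dictionary csv_object → Pre_build_availability_dictionary csv_object → Spec_build_availability_dictionary csv_object (build_availability_dictionary csv_object)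


-- ===== LEMMAS AND PROOFS =====

-- header row: every column number ≥ 1 is > 0, so each cell is inserted
theorem pv_row0_pos (row : List String) (s : Int) (hs : 1 ≤ s) (d : PySem.Dict String (List String)) :
    (PySem.List.enumerate row s).foldl
      (fun d cc => if cc.1 > 0 then d.insert cc.2 ([] : List String) else d) d
    = row.foldl (fun d day => d.insert day []) d := by
  induction row generalizing s d with
  | nil => simp [PySem.List.enumerate_nil]
  | cons x t ih =>
      rw [PySem.List.enumerate_cons]
      simp only [List.foldl_cons]
      rw [if_pos (by simp; omega)]
      exact ih (s+1) (by omega) _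

theorem pv_row0 (row : List String) (d : PySem.Dict String (List String)) :
    (PySem.List.enumerate row 0).foldl
      (fun d cc => if cc.1 > 0 then d.insert cc.2 ([] : List String) else d) d
    = row.tail.foldl (fun d day => d.insert day []) d := by
  cases row with
  | nil => simp [PySem.List.enumerate_nil]
  | cons x t =>
      rw [PySem.List.enumerate_cons]
      simp only [List.foldl_cons]
      rw [if_neg (by simp)]
      exact pv_row0_pos t 1 le_rfl d

-- data rows: row_number ≥ 1, so the row_number == 0 branch never fires
theorem pv_rows_pos (csv : List (List String)) (rows : List (List String)) (s : Int) (hs : 1 ≤ s)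
    (d : PySem.Dict String (List String)) :
    (PySem.List.enumerate rows s).foldl (fun d rr =>
        (PySem.List.enumerate rr.2 0).foldl (fun d cc =>
          if rr.1 == 0 then (if cc.1 > 0 then d.insert cc.2 ([] : List String) else d)
          else pvCellA csv rr.2 d cc) d) d
    = rows.foldl (fun d row => (PySem.List.enumerate row 0).foldl (pvCellA csv row) d) d := by
  induction rows generalizing s d with
  | nil => simp [PySem.List.enumerate_nil]
  | cons r t ih =>
      rw [PySem.List.enumerate_cons]
      simp only [List.foldl_cons]
      have h0 : ((s, r).1 == (0:Int)) = false := by simp; omega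
      simp only [h0, Bool.false_eq_true, if_false]
      exact ih (s+1) (by omega) _

-- the seven sequential ifs collapse: at most one of them fires
theorem pv_cell_eq (csv : List (List String)) (row : List String)
    (d : PySem.Dict String (List String)) (cn : Int) (col : String) :
    pvCellA csv row d (cn, col)
    = if col = "1" ∧ 1 ≤ cn ∧ cn ≤ 7 then pvAppendA csv row cn d else d := by
  unfold pvCellA
  by_cases hc : col = "1"
  · simp only [hc, beq_self_eq_true, if_true]
    by_cases h1 : cn = 1 <;> by_cases h2 : cn = 2 <;> by_cases h3 : cn = 3 <;>
      by_cases h4 : cn = 4 <;> by_cases h5 : cn = 5 <;> by_cases h6 : cn = 6 <;>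
      by_cases h7 : cn = 7 <;> (simp_all; try omega)
  · simp only [beq_iff_eq, hc, if_false, false_and]

-- membership in enumerate: index and value of a cell
theorem pv_mem_enumerate (xs : List String) (s : Int) (cc : Int × String)
    (h : cc ∈ PySem.List.enumerate xs s) :
    ∃ c : Nat, cc.1 = s + c ∧ c < xs.length ∧ xs.getD c "" = cc.2 := by
  induction xs generalizing s with
  | nil => simp [PySem.List.enumerate_nil] at h
  | cons x t ih =>
      rw [PySem.List.enumerate_cons] at h
      rcases List.mem_cons.mp h with h | h
      · exact ⟨0, by simp [h], by simp, by simp [h]⟩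
      · obtain ⟨c, h1, h2, h3⟩ := ih (s+1) h
        exact ⟨c+1, by omega, by simp; omega, by simpa using h3⟩

-- effect of one data cell on a single key's value
theorem pv_cell_getD (csv : List (List String)) (row : List String)
    (d : PySem.Dict String (List String)) (cn : Int) (col : String) (k : String) :
    (pvCellA csv row d (cn, col)).getD k []
    = d.getD k [] ++
      (if col = "1" ∧ 1 ≤ cn ∧ cn ≤ 7 ∧ PySem.List.pyGetD (PySem.List.pyGetD csv 0 []) cn "" = k
       then [PySem.List.pyGetD row 0 ""] else []) := by
  rw [pv_cell_eq]
  by_cases h : col = "1" ∧ 1 ≤ cn ∧ cn ≤ 7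
  · rw [if_pos h]
    unfold pvAppendA
    rw [PySem.Dict.getD_modify]
    by_cases hk : PySem.List.pyGetD (PySem.List.pyGetD csv 0 []) cn "" = k
    · rw [if_pos hk.symm, hk, if_pos ⟨h.1, h.2.1, h.2.2, rfl⟩]
    · rw [if_neg (fun e => hk e.symm), if_neg (by tauto), List.append_nil]
  · rw [if_neg h, if_neg (by tauto), List.append_nil]

-- a whole data row's effect on a single key's value
theorem pv_cells_getD (csv : List (List String)) (row : List String)
    (l : List (Int × String)) (d : PySem.Dict String (List String)) (k : String) :
    (l.foldl (pvCellA csv row) d).getD k []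
    = d.getD k [] ++
      l.flatMap (fun cc =>
        if cc.2 = "1" ∧ 1 ≤ cc.1 ∧ cc.1 ≤ 7 ∧ PySem.List.pyGetD (PySem.List.pyGetD csv 0 []) cc.1 "" = k
        then [PySem.List.pyGetD row 0 ""] else []) := by
  induction l generalizing d with
  | nil => simp
  | cons cc t ih =>
      obtain ⟨cn, col⟩ := cc
      rw [List.foldl_cons, ih, pv_cell_getD, List.flatMap_cons, List.append_assoc]

-- all data rows' effect on a single key's value
theorem pv_rows_getD (csv : List (List String)) (rows : List (List String))
    (d : PySem.Dict String (List String)) (k : String) :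
    (rows.foldl (fun d row => (PySem.List.enumerate row 0).foldl (pvCellA csv row) d) d).getD k []
    = d.getD k [] ++
      rows.flatMap (fun row => (PySem.List.enumerate row 0).flatMap (fun cc =>
        if cc.2 = "1" ∧ 1 ≤ cc.1 ∧ cc.1 ≤ 7 ∧ PySem.List.pyGetD (PySem.List.pyGetD csv 0 []) cc.1 "" = k
        then [PySem.List.pyGetD row 0 ""] else [])) := by
  induction rows generalizing d with
  | nil => simp
  | cons r t ih =>
      rw [List.foldl_cons, ih, pv_cells_getD, List.flatMap_cons, List.append_assoc]

-- the initial dictionary maps every key to []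
theorem pv_d0_getD (days : List String) (d : PySem.Dict String (List String)) (k : String)
    (hd : d.getD k [] = []) :
    (days.foldl (fun d day => d.insert day []) d).getD k [] = [] := by
  induction days generalizing d with
  | nil => exact hd
  | cons x t ih =>
      rw [List.foldl_cons]
      refine ih _ ?_
      rw [PySem.Dict.getD_insert]
      split <;> simp [hd]

-- a data cell never changes the key list (its key is already present)
theorem pv_cell_keys (csv : List (List String)) (row : List String)
    (d : PySem.Dict String (List String)) (cn : Int) (col : String)
    (h : col = "1" → 1 ≤ cn → cn ≤ 7 →
      PySem.List.pyGetD (PySem.List.pyGetD csv 0 []) cn "" ∈ d.keys) :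
    (pvCellA csv row d (cn, col)).keys = d.keys := by
  rw [pv_cell_eq]
  split
  · rename_i hcond
    unfold pvAppendA
    rw [PySem.Dict.keys_modify]
    exact PySem.Dict.keys_insert_of_contains _ _
      ((PySem.Dict.contains_iff_mem_keys _ _).mpr (h hcond.1 hcond.2.1 hcond.2.2))
  · rfl

-- a whole data row never changes the key list
theorem pv_cells_keys (csv : List (List String)) (row : List String)
    (l : List (Int × String)) (d : PySem.Dict String (List String))
    (h : ∀ cc ∈ l, cc.2 = "1" → 1 ≤ cc.1 → cc.1 ≤ 7 →
      PySem.List.pyGetD (PySem.List.pyGetD csv 0 []) cc.1 "" ∈ d.keys) :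
    (l.foldl (pvCellA csv row) d).keys = d.keys := by
  induction l generalizing d with
  | nil => rfl
  | cons cc t ih =>
      obtain ⟨cn, col⟩ := cc
      rw [List.foldl_cons]
      have hk : (pvCellA csv row d (cn, col)).keys = d.keys :=
        pv_cell_keys csv row d cn col (h (cn, col) (List.mem_cons_self) )
      rw [ih _ (fun cc hcc h1 h2 h3 => by
        rw [hk]; exact h cc (List.mem_cons_of_mem _ hcc) h1 h2 h3), hk]

-- all data rows never change the key list
theorem pv_rows_keys (csv : List (List String)) (rows : List (List String))
    (d : PySem.Dict String (List String))
    (h : ∀ row ∈ rows, ∀ cc ∈ PySem.List.enumerate row 0, cc.2 = "1" → 1 ≤ cc.1 → cc.1 ≤ 7 →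
      PySem.List.pyGetD (PySem.List.pyGetD csv 0 []) cc.1 "" ∈ d.keys) :
    (rows.foldl (fun d row => (PySem.List.enumerate row 0).foldl (pvCellA csv row) d) d).keys
      = d.keys := by
  induction rows generalizing d with
  | nil => rfl
  | cons r t ih =>
      rw [List.foldl_cons]
      have hk := pv_cells_keys csv r (PySem.List.enumerate r 0) d (h r (List.mem_cons_self))
      rw [ih _ (fun row hrow cc hcc h1 h2 h3 => by
        rw [hk]; exact h row (List.mem_cons_of_mem _ hrow) cc hcc h1 h2 h3), hk]

-- B's insert loop: keys other than k leave k's value alone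
theorem pv_B_getD_notmem (header : List String) (rows : List (List String))
    (cs : List Int) (d : PySem.Dict String (List String)) (k : String)
    (h : ∀ c ∈ cs, PySem.List.pyGetD header c "" ≠ k) :
    (cs.foldl (fun d c => d.insert (PySem.List.pyGetD header c "") (pvCollectB rows c)) d).getD k []
      = d.getD k [] := by
  induction cs generalizing d with
  | nil => rfl
  | cons c t ih =>
      rw [List.foldl_cons, ih _ (fun c' hc' => h c' (List.mem_cons_of_mem _ hc')),
        PySem.Dict.getD_insert,
        if_neg (fun e => h c List.mem_cons_self e.symm)]

-- B's insert loop: the unique column mapping to k determines k's value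
theorem pv_B_getD_mem (header : List String) (rows : List (List String))
    (cs : List Int) (d : PySem.Dict String (List String)) (k : String) (c0 : Int)
    (hnod : cs.Nodup) (hc0 : c0 ∈ cs) (hk : PySem.List.pyGetD header c0 "" = k)
    (huniq : ∀ c ∈ cs, PySem.List.pyGetD header c "" = k → c = c0) :
    (cs.foldl (fun d c => d.insert (PySem.List.pyGetD header c "") (pvCollectB rows c)) d).getD k []
      = pvCollectB rows c0 := by
  induction cs generalizing d with
  | nil => simp at hc0
  | cons c t ih =>
      rw [List.foldl_cons]
      by_cases he : PySem.List.pyGetD header c "" = k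
      · have hcc0 : c = c0 := huniq c List.mem_cons_self he
        subst hcc0
        have hnot : ∀ c' ∈ t, PySem.List.pyGetD header c' "" ≠ k := by
          intro c' hc' e
          exact (List.nodup_cons.mp hnod).1 (huniq c' (List.mem_cons_of_mem _ hc') e ▸ hc')
        rw [pv_B_getD_notmem header rows t _ k hnot, PySem.Dict.getD_insert, if_pos he.symm]
      · have hc0t : c0 ∈ t := by
          rcases List.mem_cons.mp hc0 with rfl | h
          · exact absurd hk he
          · exact h
        exact ih _ (List.nodup_cons.mp hnod).2 hc0t
          (fun c' hc' e => huniq c' (List.mem_cons_of_mem _ hc') e)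

-- scanning a row for the cell at column c0 that equals "1"
theorem pv_enum_pick (row : List String) (s : Int) (c0 : Int) (g : String) :
    (PySem.List.enumerate row s).flatMap
      (fun cc => if cc.1 = c0 ∧ cc.2 = "1" then [g] else [])
    = if s ≤ c0 ∧ c0 < s + row.length ∧ row.getD (c0 - s).toNat "" = "1"
      then [g] else [] := by
  induction row generalizing s with
  | nil =>
      rw [PySem.List.enumerate_nil, List.flatMap_nil,
        if_neg (by rintro ⟨h1, h2, _⟩; simp at h2; omega)]
  | cons x t ih =>
      rw [PySem.List.enumerate_cons, List.flatMap_cons, ih (s+1)]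
      by_cases h : s = c0
      · subst h
        have e0 : (s - s).toNat = 0 := by omega
        by_cases hx : x = "1"
        · rw [if_pos ⟨rfl, hx⟩, if_neg (by rintro ⟨h1, _⟩; omega), List.append_nil,
            if_pos ⟨le_rfl, by push_cast [List.length_cons]; omega, by rw [e0]; simpa using hx⟩]
        · rw [if_neg (by rintro ⟨_, h2⟩; exact hx h2), List.nil_append,
            if_neg (by rintro ⟨h1, _⟩; omega),
            if_neg (by rintro ⟨_, _, h3⟩; rw [e0] at h3; simp at h3; exact hx h3)]
      · rw [if_neg (by rintro ⟨h1, _⟩; exact h h1), List.nil_append]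
        by_cases h1 : s + 1 ≤ c0
        · have e1 : (c0 - s).toNat = (c0 - (s+1)).toNat + 1 := by omega
          rw [e1, List.getD_cons_succ]
          exact if_congr (by constructor <;> (rintro ⟨a, b, c⟩; exact ⟨by omega, by simp at b ⊢; omega, c⟩)) rfl rfl
        · rw [if_neg (by rintro ⟨a, _⟩; omega), if_neg (by rintro ⟨a, _⟩; omega)]

-- a day-column's name, as an element of (header.drop 1).take 7
theorem pv_key_getElem (header : List String) (c : Int) (h1 : 1 ≤ c)
    (h2 : c < min (header.length : Int) 8) :
    ∃ hlt : c.toNat - 1 < ((header.drop 1).take 7).length,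
      PySem.List.pyGetD header c "" = ((header.drop 1).take 7)[c.toNat - 1]'hlt := by
  have hc : c < (header.length : Int) := lt_of_lt_of_le h2 (min_le_left _ _)
  have hlt : c.toNat - 1 < ((header.drop 1).take 7).length := by
    simp [List.length_take]; omega
  refine ⟨hlt, ?_⟩
  rw [PySem.List.pyGetD_eq_getElem header "" (by omega) hc]
  rw [List.getElem_take, List.getElem_drop]
  congr 1
  omega

-- distinct day names make the day-column of a name unique
theorem pv_key_inj (header : List String) (hnd : ((header.drop 1).take 7).Nodup)
    (c c' : Int) (h1 : 1 ≤ c) (h2 : c < min (header.length : Int) 8)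
    (h1' : 1 ≤ c') (h2' : c' < min (header.length : Int) 8)
    (he : PySem.List.pyGetD header c "" = PySem.List.pyGetD header c' "") : c = c' := by
  obtain ⟨hl, el⟩ := pv_key_getElem header c h1 h2
  obtain ⟨hl', el'⟩ := pv_key_getElem header c' h1' h2'
  rw [el, el'] at he
  have := (List.Nodup.getElem_inj_iff hnd).mp he
  omega

-- a day-column's name is one of the keys created from the header row
theorem pv_key_mem_tail (header : List String) (c : Int) (h1 : 1 ≤ c)
    (h2 : c < (header.length : Int)) :
    PySem.List.pyGetD header c "" ∈ header.tail := by
  rw [PySem.List.pyGetD_eq_getElem header "" (by omega) h2]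
  have hlt : c.toNat - 1 < header.tail.length := by simp [List.length_tail]; omega
  have : header[c.toNat] = header.tail[c.toNat - 1]'hlt := by
    rw [List.getElem_tail]; congr 1; omega
  rw [this]
  exact List.getElem_mem hlt

-- a data row's appends to the (unique) day k living in column c0
theorem pv_row_contrib_mem (header row : List String)
    (hrow : ∀ c : Nat, c < 8 → 1 ≤ c → c < row.length → row.getD c "" = "1" → c < header.length)
    (hnd : ((header.drop 1).take 7).Nodup)
    (k : String) (c0 : Int) (h01 : 1 ≤ c0) (h02 : c0 < min (header.length : Int) 8)
    (hk : PySem.List.pyGetD header c0 "" = k) :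
    (PySem.List.enumerate row 0).flatMap (fun cc =>
      if cc.2 = "1" ∧ 1 ≤ cc.1 ∧ cc.1 ≤ 7 ∧ PySem.List.pyGetD header cc.1 "" = k
      then [PySem.List.pyGetD row 0 ""] else [])
    = if decide (c0 < (row.length : Int)) && (PySem.List.pyGetD row c0 "" == "1")
      then [PySem.List.pyGetD row 0 ""] else [] := by
  rw [List.flatMap_congr (g := fun cc =>
      if cc.1 = c0 ∧ cc.2 = "1" then [PySem.List.pyGetD row 0 ""] else [])
    (fun cc hcc => by
      obtain ⟨c, hc1, hc2, hc3⟩ := pv_mem_enumerate row 0 cc hcc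
      refine if_congr ?_ rfl rfl
      constructor
      · rintro ⟨hcol, ha, hb, hkey⟩
        have hcn : c < header.length := by
          refine hrow c (by omega) (by omega) hc2 ?_
          rw [hc3, hcol]
        refine ⟨pv_key_inj header hnd cc.1 c0 ha (by simp; omega) h01 h02 (hkey.trans hk.symm), hcol⟩
      · rintro ⟨he, hcol⟩
        exact ⟨hcol, by omega, by omega, he ▸ hk⟩)]
  rw [pv_enum_pick row 0 c0]
  by_cases hlen : c0 < (row.length : Int)
  · have hg : PySem.List.pyGetD row c0 "" = row.getD c0.toNat "" := by
      rw [PySem.List.pyGetD_eq_getElem row "" (by omega) hlen,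
        List.getD_eq_getElem _ _ (by omega)]
    by_cases hval : row.getD (c0 - 0).toNat "" = "1"
    · rw [if_pos ⟨by omega, by omega, hval⟩,
        if_pos (by simp [hg, hlen]; simpa using hval)]
    · rw [if_neg (by rintro ⟨_, _, h3⟩; exact hval h3),
        if_neg (by simp [hg, hlen]; intro h; exact absurd (by simpa using h) hval)]
  · rw [if_neg (by rintro ⟨_, h2, _⟩; simp at h2; omega),
      if_neg (by simp [hlen])]

-- a data row appends nothing to a name that is no day-column's name
theorem pv_row_contrib_none (header row : List String)
    (hrow : ∀ c : Nat, c < 8 → 1 ≤ c → c < row.length → row.getD c "" = "1" → c < header.length)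
    (k : String)
    (hnone : ∀ c : Int, 1 ≤ c → c < min (header.length : Int) 8 →
      PySem.List.pyGetD header c "" ≠ k) :
    (PySem.List.enumerate row 0).flatMap (fun cc =>
      if cc.2 = "1" ∧ 1 ≤ cc.1 ∧ cc.1 ≤ 7 ∧ PySem.List.pyGetD header cc.1 "" = k
      then [PySem.List.pyGetD row 0 ""] else [])
    = [] := by
  rw [List.flatMap_congr (g := fun _ => []) (fun cc hcc => by
    obtain ⟨c, hc1, hc2, hc3⟩ := pv_mem_enumerate row 0 cc hcc
    rw [if_neg ?_]
    rintro ⟨hcol, ha, hb, hkey⟩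
    have hcn : c < header.length := by
      refine hrow c (by omega) (by omega) hc2 ?_
      rw [hc3, hcol]
    exact hnone cc.1 ha (by simp; omega) hkey)]
  simp

-- A unrolled: header row builds the keys, then the data rows are folded
theorem pv_A_eq (header : List String) (rows : List (List String)) :
    build_availability_dictionary (header :: rows)
    = ((rows.foldl
        (fun d row => (PySem.List.enumerate row 0).foldl (pvCellA (header :: rows) row) d)
        (header.tail.foldl (fun d day => d.insert day []) PySem.Dict.empty))).items := by
  unfold build_availability_dictionary
  rw [PySem.List.enumerate_cons, List.foldl_cons]
  have h0 : (((0 : Int), header).1 == (0 : Int)) = true := by simp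
  simp only [h0, if_true, zero_add]
  rw [pv_row0, pv_rows_pos (header :: rows) rows 1 le_rfl]

-- B unrolled
theorem pv_B_eq (header : List String) (rows : List (List String)) :
    build_availability_dictionary_alt (header :: rows)
    = ((PySem.List.pyRange 1 (min (header.length : Int) 8) 1).foldl
        (fun d c => d.insert (PySem.List.pyGetD header c "") (pvCollectB rows c))
        (header.tail.foldl (fun d day => d.insert day []) PySem.Dict.empty)).items := by
  simp only [build_availability_dictionary_alt]
  rw [PySem.List.slice_from_one]

theorem pv_main (csv : List (List String))
    (hnd : (((csv.headD []).drop 1).take 7).Nodup)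
    (hcells : ∀ r ∈ csv.tail, ∀ c : Nat, c < 8 → 1 ≤ c → c < r.length →
      r.getD c "" = "1" → c < (csv.headD []).length) :
    build_availability_dictionary csv = build_availability_dictionary_alt csv := by
  cases csv with
  | nil => rfl
  | cons header rows =>
    simp only [List.headD_cons, List.tail_cons] at hnd hcells
    rw [pv_A_eq, pv_B_eq]
    set d0 := header.tail.foldl (fun d day => d.insert day []) PySem.Dict.empty with hd0
    have hkeys0 : d0.keys = PySem.Set.ofList header.tail := by
      have h1 := PySem.Dict.keys_foldl_insert header.tail
        (fun _ _ => ([] : List String)) PySem.Dict.empty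
      simpa [PySem.Dict.keys_empty, PySem.Set.update_nil_left, hd0] using h1
    have hkeysA : (rows.foldl
        (fun d row => (PySem.List.enumerate row 0).foldl (pvCellA (header :: rows) row) d)
        d0).keys = d0.keys := by
      refine pv_rows_keys (header :: rows) rows d0 ?_
      intro row hrow cc hcc h1 h2 h3
      obtain ⟨c, hc1, hc2, hc3⟩ := pv_mem_enumerate row 0 cc hcc
      rw [PySem.List.pyGetD_zero_cons]
      have hcn : c < header.length :=
        hcells row hrow c (by omega) (by omega) hc2 (by rw [hc3, h1])
      rw [hkeys0]
      exact (PySem.Set.mem_ofList _ _).mpr (pv_key_mem_tail header cc.1 h2 (by omega))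
    have hkeysB : ((PySem.List.pyRange 1 (min (header.length : Int) 8) 1).foldl
        (fun d c => d.insert (PySem.List.pyGetD header c "") (pvCollectB rows c))
        d0).keys = d0.keys := by
      have h1 := PySem.Dict.keys_foldl_insert_key
        (PySem.List.pyRange 1 (min (header.length : Int) 8) 1)
        (fun c => PySem.List.pyGetD header c "") (fun _ c => pvCollectB rows c) d0
      rw [PySem.Set.update_eq_append_filter] at h1
      have hf : ((PySem.Set.ofList ((PySem.List.pyRange 1 (min (header.length : Int) 8) 1).map
          (fun c => PySem.List.pyGetD header c ""))).filter
          (fun y => !PySem.Set.contains d0.keys y)) = [] := by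
        apply List.filter_eq_nil_iff.mpr
        intro y hy
        obtain ⟨c, hc, rfl⟩ := List.mem_map.mp (((PySem.Set.mem_ofList _ _).mp hy))
        have hb := PySem.List.mem_pyRange_one.mp hc
        have hmem : PySem.List.pyGetD header c "" ∈ d0.keys := by
          rw [hkeys0]
          exact (PySem.Set.mem_ofList _ _).mpr (pv_key_mem_tail header c hb.1 (by omega))
        simpa using hmem
      simp only [hf, List.append_nil] at h1
      exact h1
    have hgetD : ∀ k, (rows.foldl
        (fun d row => (PySem.List.enumerate row 0).foldl (pvCellA (header :: rows) row) d)
        d0).getD k []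
      = ((PySem.List.pyRange 1 (min (header.length : Int) 8) 1).foldl
        (fun d c => d.insert (PySem.List.pyGetD header c "") (pvCollectB rows c))
        d0).getD k [] := by
      intro k
      rw [pv_rows_getD]
      rw [pv_d0_getD header.tail PySem.Dict.empty k (by simp [PySem.Dict.getD_empty])]
      rw [List.nil_append]
      simp only [PySem.List.pyGetD_zero_cons]
      by_cases hex : ∃ c0 : Int, (1 ≤ c0 ∧ c0 < min (header.length : Int) 8) ∧
          PySem.List.pyGetD header c0 "" = k
      · obtain ⟨c0, ⟨h01, h02⟩, hk0⟩ := hex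
        rw [List.flatMap_congr (fun row hrow =>
          pv_row_contrib_mem header row (hcells row hrow) hnd k c0 h01 h02 hk0)]
        rw [pv_B_getD_mem header rows _ d0 k c0 (PySem.List.nodup_pyRange_one _ _)
          (PySem.List.mem_pyRange_one.mpr ⟨h01, h02⟩) hk0
          (fun c hc e => pv_key_inj header hnd c c0
            (PySem.List.mem_pyRange_one.mp hc).1 (PySem.List.mem_pyRange_one.mp hc).2
            h01 h02 (e.trans hk0.symm))]
        rw [pvCollectB, List.filterMap_eq_flatMap_toList]
        refine List.flatMap_congr (fun row _ => ?_)
        split <;> rfl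
      · push Not at hex
        rw [List.flatMap_congr (fun row hrow =>
          pv_row_contrib_none header row (hcells row hrow) k
            (fun c hc1 hc2 => hex c ⟨hc1, hc2⟩))]
        rw [pv_B_getD_notmem header rows _ d0 k
          (fun c hc => hex c ⟨(PySem.List.mem_pyRange_one.mp hc).1,
            (PySem.List.mem_pyRange_one.mp hc).2⟩)]
        rw [pv_d0_getD header.tail PySem.Dict.empty k (by simp [PySem.Dict.getD_empty])]
        simp
    rw [PySem.Dict.items_eq_map_keys _ (by rw [hkeysA, hkeys0]; exact PySem.Set.nodup_ofList _) ([] : List String),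
      PySem.Dict.items_eq_map_keys _ (by rw [hkeysB, hkeys0]; exact PySem.Set.nodup_ofList _) ([] : List String),
      hkeysA, hkeysB]
    exact List.map_congr_left (fun k _ => by rw [hgetD k])

-- ===== VERDICT (by name: the statement is the Claim_ definition above) =====
theorem build_availability_dictionary_spec : Claim_equal_build_availability_dictionary := by
  intro csv _ hpre
  show build_availability_dictionary csv = build_availability_dictionary_alt csv
  exact pv_main csv hpre.1 hpre.2
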